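-- pv_equiv track=rewrite | github.com/kdmtakumi/IDR-CC-webviewer | bundle_pipeline/plot_deeptmhmm_overlay_threshold.py | flags_to_intervals
-- ===== SOURCE A (Python) =====
-- from typing import List, Tuple
--
-- def flags_to_intervals(flags: List[bool]) -> List[Tuple[int, int]]:
--     intervals: List[Tuple[int, int]] = []
--     if not flags:
--         return intervals
--     start = None
--     for i, val in enumerate(flags, start=1):
--         if val and start is None:
--             start = i
--         if start is not None and (not val or i == len(flags)):
--             end = i if val and i == len(flags) else i - 1
--             intervals.append((start, end))
--             start = None
--     return intervals
-- ===== SOURCE B (Python) =====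
-- from itertools import groupby
--
-- def flags_to_intervals(flags):
--     intervals = []
--     cursor = 0
--     for key, grp in groupby(flags, key=bool):
--         length = sum(1 for _ in grp)
--         if key:
--             intervals.append((cursor + 1, cursor + length))
--         cursor += length
--     return intervals
-- ===== Notes on version B (the rewrite author's own statement) =====
-- stated objective: idiomatic
-- what changed: Replaced A's per-element start/end bookkeeping with sentinel state over enumerate by an itertools.groupby pass that emits one interval per truthy run while advancing a cursor by each group's length.
import Mathlib
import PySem

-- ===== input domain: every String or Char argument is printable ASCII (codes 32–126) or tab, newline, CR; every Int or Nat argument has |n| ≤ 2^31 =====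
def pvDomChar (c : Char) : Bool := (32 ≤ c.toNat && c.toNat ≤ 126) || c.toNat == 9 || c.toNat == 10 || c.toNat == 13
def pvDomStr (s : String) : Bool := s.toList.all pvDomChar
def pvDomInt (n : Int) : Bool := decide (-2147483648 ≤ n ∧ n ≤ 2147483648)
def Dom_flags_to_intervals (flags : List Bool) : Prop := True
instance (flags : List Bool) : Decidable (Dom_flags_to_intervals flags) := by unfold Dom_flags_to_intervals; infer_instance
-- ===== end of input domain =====

-- B replaces A's per-element start/end bookkeeping by a groupby-style pass over runs (objective: idiomatic).

-- ===== PORT A =====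
-- one step of A's loop body over enumerate(flags, start=1)
def pvStepA (n : Int) (s : List (Int × Int) × Option Int) (p : Int × Bool) :
    List (Int × Int) × Option Int :=
  let intervals := s.1
  let start0 := s.2
  let i := p.1
  let val := p.2
  let start := if val && start0.isNone then some i else start0
  match start with
  | some st =>
    if !val || i == n then
      let e : Int := if val && (i == n) then i else i - 1
      (intervals ++ [(st, e)], none)
    else (intervals, some st)
  | none => (intervals, none)

def flags_to_intervals (flags : List Bool) : List (Int × Int) :=
  if flags.isEmpty then []
  else ((PySem.List.enumerate flags 1).foldl (pvStepA (flags.length : Int)) ([], none)).1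

-- ===== PORT B =====
-- groupby(flags, key=bool): take the leading run of the head's value, emit an interval if the
-- key is true, advance the cursor by the run length
def pvGroupsB : List Bool → Int → List (Int × Int)
  | [], _ => []
  | b :: rest, cursor =>
    let grp := rest.takeWhile (· == b)
    let L : Int := (grp.length : Int) + 1
    (if b then [(cursor + 1, cursor + L)] else []) ++
      pvGroupsB (rest.dropWhile (· == b)) (cursor + L)
termination_by ys _ => ys.length
decreasing_by
  simpa using Nat.lt_succ_of_le (List.length_dropWhile_le _ _)

def flags_to_intervals_alt (flags : List Bool) : List (Int × Int) :=
  pvGroupsB flags 0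

-- ===== PRECONDITION & SPEC =====
def Spec_flags_to_intervals (flags : List Bool) (out : List (Int × Int)) : Prop := out = flags_to_intervals_alt flags
instance (flags : List Bool) (out : List (Int × Int)) : Decidable (Spec_flags_to_intervals flags out) := by unfold Spec_flags_to_intervals; infer_instance

-- ===== CLAIM (what is proved, stated in full; the proofs are below) =====
def Claim_equal_flags_to_intervals : Prop := ∀ (flags : List Bool), Dom_flags_to_intervals flags → Spec_flags_to_intervals flags (flags_to_intervals flags)

-- ===== LEMMAS AND PROOFS =====

-- B on a false-headed list just advances the cursor past the leading false
lemma pvGroupsB_false (rest : List Bool) (c : Int) :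
    pvGroupsB (false :: rest) c = pvGroupsB rest (c + 1) := by
  cases rest with
  | nil => simp [pvGroupsB]
  | cons b r2 =>
    cases b with
    | false =>
      simp only [pvGroupsB, List.takeWhile, List.dropWhile]
      norm_num
      ring_nf
    | true =>
      simp [pvGroupsB]

-- joint loop invariant: folding A's step over the suffix ys (enumerated from j+1, total length n)
-- from state (acc, none) appends exactly B's intervals for ys at cursor j; from state
-- (acc, some s) it first closes the open interval at the end of the leading true-run.
lemma pvMain (N : Nat) : ∀ (ys : List Bool), ys.length = N → ∀ (n j : Nat) (acc : List (Int × Int)),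
    j + ys.length = n →
    ((PySem.List.enumerate ys ((j : Int)+1)).foldl (pvStepA (n : Int)) (acc, none)
        = (acc ++ pvGroupsB ys (j : Int), none)
    ∧ (ys ≠ [] → ∀ (s : Int),
        (PySem.List.enumerate ys ((j : Int)+1)).foldl (pvStepA (n : Int)) (acc, some s) =
          (acc ++ [(s, ((j + (ys.takeWhile (· == true)).length : Nat) : Int))]
             ++ pvGroupsB (ys.dropWhile (· == true)) ((j + (ys.takeWhile (· == true)).length : Nat) : Int),
           none))) := by
  induction N using Nat.strong_induction_on with
  | _ N ih =>
    intro ys hlen n j acc hn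
    cases ys with
    | nil => exact ⟨by simp [pvGroupsB, PySem.List.enumerate_nil], by simp⟩
    | cons b rest =>
      simp only [List.length_cons] at hlen hn
      have hr : rest.length < N := by omega
      have IH := ih rest.length hr rest rfl
      constructor
      · -- none-state
        rw [PySem.List.enumerate_cons, List.foldl_cons]
        cases b with
        | false =>
          have hstep : pvStepA (n : Int) (acc, none) ((j : Int)+1, false) = (acc, none) := by
            simp [pvStepA]
          rw [hstep]
          have h1 := (IH n (j+1) acc (by omega)).1
          push_cast at h1
          rw [h1, pvGroupsB_false]
        | true =>
          cases rest with
          | nil =>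
            have hjn : (j : Int) + 1 = (n : Int) := by
              simp only [List.length_nil] at hn; omega
            have hstep : pvStepA (n : Int) (acc, none) ((j : Int)+1, true) =
                (acc ++ [((j : Int)+1, (j : Int)+1)], none) := by
              simp [pvStepA, hjn]
            rw [hstep]
            simp [pvGroupsB, PySem.List.enumerate_nil]
          | cons b2 r2 =>
            have hjn : (((j : Int) + 1) == (n : Int)) = false := by
              simp only [List.length_cons] at hn; simp; omega
            have hstep : pvStepA (n : Int) (acc, none) ((j : Int)+1, true) =
                (acc, some ((j : Int)+1)) := by
              simp [pvStepA, hjn]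
            rw [hstep]
            have h2 := (IH n (j+1) acc (by simp only [List.length_cons] at hn ⊢; omega)).2
              (by simp) ((j : Int)+1)
            push_cast at h2
            rw [h2]
            conv_rhs => rw [pvGroupsB]
            simp only [List.takeWhile_cons, List.dropWhile_cons]
            push_cast
            simp [List.append_assoc]
            constructor
            · ring_nf
            · ring_nf
      · -- some-state
        intro _ s
        rw [PySem.List.enumerate_cons, List.foldl_cons]
        cases b with
        | false =>
          have hstep : pvStepA (n : Int) (acc, some s) ((j : Int)+1, false) =
              (acc ++ [(s, (j : Int))], none) := by
            simp [pvStepA]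
          rw [hstep]
          have h1 := (IH n (j+1) (acc ++ [(s, (j : Int))]) (by omega)).1
          push_cast at h1
          rw [h1]
          simp only [List.takeWhile_cons, List.dropWhile_cons]
          norm_num
          exact (pvGroupsB_false rest (j : Int)).symm
        | true =>
          cases rest with
          | nil =>
            have hjn : (j : Int) + 1 = (n : Int) := by
              simp only [List.length_nil] at hn; omega
            have hstep : pvStepA (n : Int) (acc, some s) ((j : Int)+1, true) =
                (acc ++ [(s, (j : Int)+1)], none) := by
              simp [pvStepA, hjn]
            rw [hstep]
            simp [pvGroupsB, PySem.List.enumerate_nil]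
          | cons b2 r2 =>
            have hjn : (((j : Int) + 1) == (n : Int)) = false := by
              simp only [List.length_cons] at hn; simp; omega
            have hstep : pvStepA (n : Int) (acc, some s) ((j : Int)+1, true) = (acc, some s) := by
              simp [pvStepA, hjn]
            rw [hstep]
            have h2 := (IH n (j+1) acc (by simp only [List.length_cons] at hn ⊢; omega)).2 (by simp) s
            push_cast at h2
            rw [h2]
            simp only [List.takeWhile_cons, List.dropWhile_cons]
            push_cast
            simp [List.append_assoc]
            constructor
            · ring_nf
            · ring_nf

-- ===== VERDICT (by name: the statement is the Claim_ definition above) =====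
theorem flags_to_intervals_spec : Claim_equal_flags_to_intervals := by
  intro flags _
  unfold Spec_flags_to_intervals flags_to_intervals flags_to_intervals_alt
  cases flags with
  | nil => simp [pvGroupsB]
  | cons b rest =>
    have h := (pvMain (b :: rest).length (b :: rest) rfl (b :: rest).length 0 [] (by simp)).1
    push_cast at h
    simp only [List.nil_append] at h
    rw [if_neg (by simp), h]
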